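-- pv_equiv track=rewrite | github.com/rishipython/deepcgh3 | experiments/exp008_deepcgh1/generate.py | __get_allowables
-- ===== SOURCE A (Python) =====
-- def __get_allowables(allow_x, allow_y, forbid_x, forbid_y):
--     '''
--     Remove the coords in forbid_x and forbid_y from the sets of points in
--     allow_x and allow_y.
--     '''
--     for i in forbid_x:
--         try:
--             allow_x.remove(i)
--         except:
--             continue
--     for i in forbid_y:
--         try:
--             allow_y.remove(i)
--         except:
--             continue
--     return allow_x, allow_y
-- ===== SOURCE B (Python) =====
-- def __get_allowables(allow_x, allow_y, forbid_x, forbid_y):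
--     '''
--     Remove the coords in forbid_x and forbid_y from the sets of points in
--     allow_x and allow_y.
--     '''
--     def filtered(allow, forbid):
--         need = {}
--         for v in forbid:
--             need[v] = need.get(v, 0) + 1
--         kept = []
--         for v in allow:
--             c = need.get(v, 0)
--             if c > 0:
--                 need[v] = c - 1
--             else:
--                 kept.append(v)
--         return kept
--     allow_x[:] = filtered(allow_x, forbid_x)
--     allow_y[:] = filtered(allow_y, forbid_y)
--     return allow_x, allow_y
-- ===== Notes on version B (the rewrite author's own statement) =====
-- stated objective: faster
-- what changed: Replaces repeated list.remove scans (one scan per forbidden coord) with a count table built once and a single filtering pass over each allow list, assigned back in place with slice assignment to preserve A's mutation of allow_x/allow_y.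
import Mathlib
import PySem

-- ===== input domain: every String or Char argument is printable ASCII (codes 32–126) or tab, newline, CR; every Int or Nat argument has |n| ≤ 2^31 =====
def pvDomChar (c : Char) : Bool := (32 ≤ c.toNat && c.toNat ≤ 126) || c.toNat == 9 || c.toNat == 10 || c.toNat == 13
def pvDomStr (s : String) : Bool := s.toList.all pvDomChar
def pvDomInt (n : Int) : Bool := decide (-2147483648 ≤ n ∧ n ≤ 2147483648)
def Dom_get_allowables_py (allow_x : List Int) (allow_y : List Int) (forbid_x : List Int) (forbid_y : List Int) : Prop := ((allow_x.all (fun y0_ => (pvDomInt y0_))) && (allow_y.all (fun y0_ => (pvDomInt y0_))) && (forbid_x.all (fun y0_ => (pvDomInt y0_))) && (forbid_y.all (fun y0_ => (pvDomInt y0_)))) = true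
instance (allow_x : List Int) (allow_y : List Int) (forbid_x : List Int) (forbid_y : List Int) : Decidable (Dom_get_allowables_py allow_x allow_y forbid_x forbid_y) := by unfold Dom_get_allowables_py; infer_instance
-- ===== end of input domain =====

-- B replaces A's repeated list.remove scans with a count table and one filtering pass per list
-- (faster); both mutate allow_x/allow_y in place and return them; equivalence proved on return values.


-- ===== PORT A =====
-- try: allow.remove(i) except: continue  — remove first occurrence, keep list unchanged on ValueError
def pvRemA (xs : List Int) (i : Int) : List Int :=
  match PySem.List.remove? xs i with
  | some l => l
  | none => xs

def get_allowables_py (allow_x : List Int) (allow_y : List Int) (forbid_x : List Int) (forbid_y : List Int) : List Int × List Int :=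
  (forbid_x.foldl pvRemA allow_x, forbid_y.foldl pvRemA allow_y)

-- ===== PORT B =====
-- helper 'filtered': build the need-count dict from forbid, then one pass over allow keeping
-- each element unless its need count is still positive (decrementing the count when skipped)
def pvFiltered (allow : List Int) (forbid : List Int) : List Int :=
  let need := forbid.foldl (fun d v => d.insert v (d.getD v 0 + 1)) PySem.Dict.empty
  (allow.foldl (fun (s : PySem.Dict Int Int × List Int) v =>
      let c := s.1.getD v 0
      if c > 0 then (s.1.insert v (c - 1), s.2) else (s.1, s.2 ++ [v]))
    (need, [])).2

def get_allowables_py_alt (allow_x : List Int) (allow_y : List Int) (forbid_x : List Int) (forbid_y : List Int) : List Int × List Int :=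
  (pvFiltered allow_x forbid_x, pvFiltered allow_y forbid_y)

-- ===== PRECONDITION & SPEC =====
def Spec_get_allowables_py (allow_x : List Int) (allow_y : List Int) (forbid_x : List Int) (forbid_y : List Int) (out : List Int × List Int) : Prop := out = get_allowables_py_alt allow_x allow_y forbid_x forbid_y
instance (allow_x : List Int) (allow_y : List Int) (forbid_x : List Int) (forbid_y : List Int) (out : List Int × List Int) : Decidable (Spec_get_allowables_py allow_x allow_y forbid_x forbid_y out) := by unfold Spec_get_allowables_py; infer_instance

-- ===== CLAIM (what is proved, stated in full; the proofs are below) =====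
def Claim_equal_get_allowables_py : Prop := ∀ (allow_x : List Int) (allow_y : List Int) (forbid_x : List Int) (forbid_y : List Int), Dom_get_allowables_py allow_x allow_y forbid_x forbid_y → Spec_get_allowables_py allow_x allow_y forbid_x forbid_y (get_allowables_py allow_x allow_y forbid_x forbid_y)

-- ===== LEMMAS AND PROOFS =====

-- functional model of B's filtering pass: g gives the remaining need count for each value
def pvKeepF : List Int → (Int → Int) → List Int
  | [], _ => []
  | a :: as, g =>
      if g a > 0 then pvKeepF as (fun x => if x = a then g x - 1 else g x)
      else a :: pvKeepF as g

theorem pvKeepF_congr (allow : List Int) {g h : Int → Int} (e : ∀ x, g x = h x) :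
    pvKeepF allow g = pvKeepF allow h := by
  have : g = h := funext e
  rw [this]

-- B's dict-state fold computes acc ++ pvKeepF allow (d.getD · 0)
theorem pvFold_eq_keepF (allow : List Int) (d : PySem.Dict Int Int) (acc : List Int) :
    (allow.foldl (fun (s : PySem.Dict Int Int × List Int) v =>
        let c := s.1.getD v 0
        if c > 0 then (s.1.insert v (c - 1), s.2) else (s.1, s.2 ++ [v]))
      (d, acc)).2 = acc ++ pvKeepF allow (fun x => d.getD x 0) := by
  induction allow generalizing d acc with
  | nil => simp [pvKeepF]
  | cons a as ih =>
    simp only [List.foldl_cons, pvKeepF]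
    by_cases h : d.getD a 0 > 0
    · simp only [h, if_pos]
      rw [ih]
      congr 1
      apply pvKeepF_congr
      intro x
      by_cases hx : x = a <;> simp [PySem.Dict.getD_insert, hx]
    · simp only [h, if_false]
      rw [ih]
      simp
theorem pvKeepF_of_nonpos (allow : List Int) (g : Int → Int) (h : ∀ x, g x ≤ 0) :
    pvKeepF allow g = allow := by
  induction allow generalizing g with
  | nil => rfl
  | cons a as ih =>
    have := h a
    simp only [pvKeepF]
    rw [if_neg (by omega)]
    rw [ih g h]

-- one removal on the allow side corresponds to one extra need count on the filter side
theorem pvRemA_keepF (allow : List Int) (f : Int) (g : Int → Int) (hg : ∀ x, 0 ≤ g x) :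
    pvKeepF (pvRemA allow f) g = pvKeepF allow (fun x => if x = f then g x + 1 else g x) := by
  induction allow generalizing g with
  | nil => simp [pvRemA, PySem.List.remove?, pvKeepF]
  | cons a as ih =>
    by_cases haf : a = f
    · subst haf
      have h1 : pvRemA (a :: as) a = as := by
        simp [pvRemA, PySem.List.remove?_cons_self]
      rw [h1]
      conv_rhs => rw [pvKeepF]
      rw [if_pos (by have := hg a; simp; omega)]
      apply pvKeepF_congr
      intro x
      by_cases hx : x = a <;> simp [hx]
    · have h1 : pvRemA (a :: as) f = a :: pvRemA as f := by
        simp only [pvRemA, PySem.List.remove?_cons_of_ne as haf]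
        cases PySem.List.remove? as f <;> simp
      rw [h1]
      simp only [pvKeepF]
      by_cases hga : g a > 0
      · rw [if_pos hga, if_pos (by simp [haf]; omega)]
        rw [ih _ (by intro x; by_cases hx : x = a <;> simp [hx] <;> [omega; exact hg x])]
        apply pvKeepF_congr
        intro x
        by_cases hx1 : x = f <;> by_cases hx2 : x = a <;>
          simp [hx1, hx2, haf] at * <;> simp_all
      · rw [if_neg hga, if_neg (by simp [haf]; omega)]
        rw [ih g hg]

-- the main correspondence: A's repeated remove = one filtering pass with the counts of forbid
theorem pvMain (forbid allow : List Int) :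
    forbid.foldl pvRemA allow = pvKeepF allow (fun x => (forbid.count x : Int)) := by
  induction forbid generalizing allow with
  | nil =>
    rw [pvKeepF_of_nonpos allow _ (by intro x; simp)]
    rfl
  | cons f fs ih =>
    simp only [List.foldl_cons]
    rw [ih]
    rw [pvRemA_keepF _ _ _ (by intro x; positivity)]
    apply pvKeepF_congr
    intro x
    by_cases hx : x = f <;> simp [hx, List.count_cons] <;> omega

theorem pvFiltered_eq (allow forbid : List Int) :
    pvFiltered allow forbid = forbid.foldl pvRemA allow := by
  unfold pvFiltered
  rw [pvFold_eq_keepF, pvMain]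
  simp only [List.nil_append]
  apply pvKeepF_congr
  intro x
  rw [PySem.Dict.getD_foldl_insert_add_one, PySem.Dict.getD_empty]
  simp

-- ===== VERDICT (by name: the statement is the Claim_ definition above) =====
theorem get_allowables_py_spec : Claim_equal_get_allowables_py := by
  intro ax ay fx fy _
  unfold Spec_get_allowables_py get_allowables_py get_allowables_py_alt
  rw [pvFiltered_eq, pvFiltered_eq]
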